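-- pv_equiv track=rewrite | github.com/agent0ai/agent-zero | plugins/_memory/helpers/auto_dream.py | parse_auto_dream_log_entries
-- ===== SOURCE A (Python) =====
-- def parse_auto_dream_log_entries(text: str) -> list[str]:
--     stripped = str(text or "").strip()
--     if not stripped:
--         return []
--
--     entries: list[str] = []
--     current: list[str] = []
--     for line in stripped.splitlines():
--         if line.startswith("# AutoDream Log"):
--             continue
--         if line.strip() == "Newest runs first.":
--             continue
--         if line.startswith("## "):
--             if current:
--                 entries.append("\n".join(current).strip())
--             current = [line]
--             continue
--         if current:
--             current.append(line)
--
--     if current: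
--         entries.append("\n".join(current).strip())
--     return [entry for entry in entries if entry]
-- ===== SOURCE B (Python) =====
-- def parse_auto_dream_log_entries(text: str) -> list[str]:
--     # Filter banner lines once, then cut the line list at header positions
--     # (drop-prefix + repeated take/drop scans) instead of A's running buffer.
--     lines = [l for l in str(text or "").strip().splitlines()
--              if not l.startswith("# AutoDream Log")
--              and l.strip() != "Newest runs first."]
--     i = 0
--     while i < len(lines) and not lines[i].startswith("## "):
--         i += 1
--     entries: list[str] = []
--     while i < len(lines):
--         j = i + 1
--         while j < len(lines) and not lines[j].startswith("## "):
--             j += 1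
--         block = "\n".join(lines[i:j]).strip()
--         if block:
--             entries.append(block)
--         i = j
--     return entries
-- ===== Notes on version B (the rewrite author's own statement) =====
-- stated objective: simpler
-- what changed: B filters the banner lines once up front and then cuts the filtered line list at the header positions (drop the pre-header prefix, then take/drop scans per block), instead of A's stateful loop with a running buffer and flush logic.
import Mathlib
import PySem

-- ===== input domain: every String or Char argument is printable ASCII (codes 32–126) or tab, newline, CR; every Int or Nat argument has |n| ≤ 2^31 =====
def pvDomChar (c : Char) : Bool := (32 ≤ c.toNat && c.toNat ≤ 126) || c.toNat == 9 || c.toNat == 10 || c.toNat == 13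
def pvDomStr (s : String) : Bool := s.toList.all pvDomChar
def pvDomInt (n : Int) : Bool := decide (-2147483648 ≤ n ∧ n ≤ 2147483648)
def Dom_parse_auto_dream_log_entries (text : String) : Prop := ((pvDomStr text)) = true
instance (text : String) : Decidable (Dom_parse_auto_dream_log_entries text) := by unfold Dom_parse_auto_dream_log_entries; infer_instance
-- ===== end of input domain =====

-- B replaces A's running-buffer-and-flush loop by filtering the banner
-- lines once and cutting the filtered line list at the header positions
-- (objective: simpler decomposition; same cost).

-- ===== PORT A =====
-- One iteration of A's for-loop over the lines; state = (entries, current).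
def pvStepA (st : List String × List String) (line : String) : List String × List String :=
  if PySem.Str.startswith line "# AutoDream Log" then st
  else if PySem.Str.strip line = "Newest runs first." then st
  else if PySem.Str.startswith line "## " then
    (st.1 ++ (if st.2 ≠ [] then [PySem.Str.strip (PySem.Str.join "\n" st.2)] else []), [line])
  else if st.2 ≠ [] then (st.1, st.2 ++ [line])
  else st

def parse_auto_dream_log_entries (text : String) : List String :=
  let stripped := PySem.Str.strip text
  if stripped = "" then []
  else
    let st := (PySem.Str.splitlines stripped).foldl pvStepA ([], [])
    let entries := st.1 ++ (if st.2 ≠ [] then [PySem.Str.strip (PySem.Str.join "\n" st.2)] else [])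
    entries.filter (fun e => e != "")

-- ===== PORT B =====
def pvKeep (l : String) : Bool :=
  !(PySem.Str.startswith l "# AutoDream Log") && !(PySem.Str.strip l == "Newest runs first.")

def pvIsHeader (l : String) : Bool := PySem.Str.startswith l "## "

-- B's outer while-loop: the inner index scan for j is the takeWhile/dropWhile split.
def pvBlocks : List String → List String
  | [] => []
  | h :: rest =>
    let body := rest.takeWhile (fun s => !pvIsHeader s)
    let rest' := rest.dropWhile (fun s => !pvIsHeader s)
    let block := PySem.Str.strip (PySem.Str.join "\n" (h :: body))
    (if block ≠ "" then [block] else []) ++ pvBlocks rest'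
termination_by l => l.length
decreasing_by
  exact Nat.lt_succ_of_le (List.length_dropWhile_le _ _)

def parse_auto_dream_log_entries_alt (text : String) : List String :=
  let lines := (PySem.Str.splitlines (PySem.Str.strip text)).filter pvKeep
  pvBlocks (lines.dropWhile (fun s => !pvIsHeader s))

-- ===== PRECONDITION & SPEC =====
def Spec_parse_auto_dream_log_entries (text : String) (out : List String) : Prop := out = parse_auto_dream_log_entries_alt text
instance (text : String) (out : List String) : Decidable (Spec_parse_auto_dream_log_entries text out) := by unfold Spec_parse_auto_dream_log_entries; infer_instance

-- ===== CLAIM (what is proved, stated in full; the proofs are below) =====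
def Claim_equal_parse_auto_dream_log_entries : Prop := ∀ (text : String), Dom_parse_auto_dream_log_entries text → Spec_parse_auto_dream_log_entries text (parse_auto_dream_log_entries text)

-- ===== LEMMAS AND PROOFS =====

-- A's step with the two banner branches removed (they never fire on kept lines).
def pvStep' (st : List String × List String) (line : String) : List String × List String :=
  if pvIsHeader line then
    (st.1 ++ (if st.2 ≠ [] then [PySem.Str.strip (PySem.Str.join "\n" st.2)] else []), [line])
  else if st.2 ≠ [] then (st.1, st.2 ++ [line])
  else st

-- Flush the current buffer and apply A's final non-empty filter.
def pvFF (st : List String × List String) : List String :=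
  (st.1 ++ (if st.2 ≠ [] then [PySem.Str.strip (PySem.Str.join "\n" st.2)] else [])).filter (fun e => e != "")

lemma pvFilter_single (s : String) :
    List.filter (fun e => e != "") [s] = if s = "" then [] else [s] := by
  by_cases h : s = "" <;> simp [h]

lemma pvStepA_eq_step' (st : List String × List String) (l : String) (h : pvKeep l = true) :
    pvStepA st l = pvStep' st l := by
  simp only [pvKeep, Bool.and_eq_true, Bool.not_eq_true', beq_eq_false_iff_ne] at h
  obtain ⟨h1, h2⟩ := h
  simp at h1
  simp [pvStepA, pvStep', pvIsHeader, h1, h2]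

lemma pvStepA_skip (st : List String × List String) (l : String) (h : pvKeep l = false) :
    pvStepA st l = st := by
  simp only [pvKeep, Bool.and_eq_false_iff, Bool.not_eq_false', beq_iff_eq] at h
  by_cases h1 : PySem.Str.startswith l "# AutoDream Log" = true
  · have h1' := h1
    simp at h1'
    simp [pvStepA, h1']
  · have h2 : PySem.Str.strip l = "Newest runs first." := by tauto
    have h1' : PySem.Str.startswith l "# AutoDream Log" = false := by
      simpa using h1
    simp at h1'
    simp [pvStepA, h1', h2]

lemma pvFoldl_filter (ls : List String) (st : List String × List String) :
    ls.foldl pvStepA st = (ls.filter pvKeep).foldl pvStep' st := by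
  induction ls generalizing st with
  | nil => rfl
  | cons l ls ih =>
    by_cases h : pvKeep l = true
    · simp [h, List.foldl_cons, pvStepA_eq_step' st l h, ih]
    · simp only [Bool.not_eq_true] at h
      simp [h, List.foldl_cons, pvStepA_skip st l h, ih]

lemma pvQ (ls : List String) (e c : List String) (hc : c ≠ []) :
    pvFF (ls.foldl pvStep' (e, c)) =
      e.filter (fun x => x != "") ++
      (if PySem.Str.strip (PySem.Str.join "\n" (c ++ ls.takeWhile (fun s => !pvIsHeader s))) ≠ ""
        then [PySem.Str.strip (PySem.Str.join "\n" (c ++ ls.takeWhile (fun s => !pvIsHeader s)))] else []) ++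
      pvBlocks (ls.dropWhile (fun s => !pvIsHeader s)) := by
  induction ls generalizing e c with
  | nil =>
    simp [pvFF, hc, pvBlocks, pvFilter_single]
  | cons l ls ih =>
    by_cases hl : pvIsHeader l = true
    · have hstep : pvStep' (e, c) l =
        (e ++ [PySem.Str.strip (PySem.Str.join "\n" c)], [l]) := by
        simp [pvStep', hl, hc]
      rw [List.foldl_cons, hstep, ih _ [l] (by simp)]
      rw [List.takeWhile_cons, List.dropWhile_cons]
      simp only [hl, Bool.not_true, Bool.false_eq_true, if_false]
      rw [pvBlocks]
      simp [pvFilter_single, List.append_assoc]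
    · have hl' : (!pvIsHeader l) = true := by simp [hl]
      have hstep : pvStep' (e, c) l = (e, c ++ [l]) := by
        simp [pvStep', hl, hc]
      rw [List.foldl_cons, hstep, ih _ _ (by simp [hc])]
      rw [List.takeWhile_cons, List.dropWhile_cons]
      simp [hl', List.append_assoc]

lemma pvP (ls : List String) (e : List String) :
    pvFF (ls.foldl pvStep' (e, [])) =
      e.filter (fun x => x != "") ++ pvBlocks (ls.dropWhile (fun s => !pvIsHeader s)) := by
  induction ls generalizing e with
  | nil => simp [pvFF, pvBlocks]
  | cons l ls ih =>
    by_cases hl : pvIsHeader l = true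
    · have hstep : pvStep' (e, []) l = (e, [l]) := by simp [pvStep', hl]
      rw [List.foldl_cons, hstep, pvQ ls e [l] (by simp)]
      rw [List.dropWhile_cons]
      simp only [hl, Bool.not_true, Bool.false_eq_true, if_false]
      rw [pvBlocks]
      simp
    · have hstep : pvStep' (e, []) l = (e, []) := by simp [pvStep', hl]
      rw [List.foldl_cons, hstep, ih]
      rw [List.dropWhile_cons]
      simp [hl]

-- ===== VERDICT (by name: the statement is the Claim_ definition above) =====
theorem parse_auto_dream_log_entries_spec : Claim_equal_parse_auto_dream_log_entries := by
  intro text _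
  unfold Spec_parse_auto_dream_log_entries parse_auto_dream_log_entries parse_auto_dream_log_entries_alt
  by_cases h : PySem.Str.strip text = ""
  · rw [h]
    have hs : PySem.Str.splitlines "" = ([] : List String) := by decide
    simp [hs, pvBlocks]
  · simp only [h, if_false]
    rw [show ∀ st : List String × List String,
        (st.1 ++ (if st.2 ≠ [] then [PySem.Str.strip (PySem.Str.join "\n" st.2)] else [])).filter
          (fun e => e != "") = pvFF st from fun _ => rfl]
    rw [pvFoldl_filter, pvP]
    simp
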